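-- pv_equiv track=rewrite | github.com/sanakaich/personalised-food-chart | meal_type.py | assign_meal
-- ===== SOURCE A (Python) =====
-- non_edible_keywords = [
--     "oil", "butter", "fat", "grease", "lard", "syrup", "vinegar", "sauce",
--     "gravy", "powder", "spice", "seasoning", "salt", "sugar", "extract",
--     "flour", "yeast", "baking", "mix", "starch", "gelatin", "pectin",
--     "dressing", "essence", "seeds", "kernel", "bran", "meal"
-- ]
--
-- rules = {
--     "Breakfast": [
--         "egg", "omelet", "pancake", "muffin", "toast", "cereal", "oats", "oatmeal",
--         "porridge", "idli", "dosa", "upma", "poha", "paratha", "bagel", "croissant",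
--         "yogurt", "lassi", "waffle", "donut", "jam", "honey", "tea", "coffee", "milk",
--         "smoothie"
--     ],
--     "Lunch": [
--         "rice", "biryani", "sandwich", "burger", "wrap", "shawarma", "chicken", "fish",
--         "beef", "mutton", "pork", "dal", "paneer", "sabji", "roti", "chapati", "thali",
--         "noodle", "pasta", "curry", "quesadilla", "enchilada", "burrito", "taco",
--         "paratha", "fried rice", "kebab", "cutlet", "idli sambar", "pulao", "pav bhaji"
--     ],
--     "Dinner": [
--         "steak", "soup", "stew", "gravy", "chowder", "chop", "roast", "lasagna",
--         "pizza", "spaghetti", "fajita", "saute", "fillet", "cutlet", "meatloaf",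
--         "dal", "sabji", "paneer", "biryani", "thali", "curry", "roti", "naan",
--         "pulao", "fried rice", "korma"
--     ],
--     "Snacks": [
--         "chips", "fries", "pakora", "samosa", "vada", "bhel", "chaat", "puff",
--         "roll", "spring roll", "nuts", "candy", "chocolate", "cookie", "crackers",
--         "pastry", "pie", "cake", "snack", "fudge", "jelly", "pudding", "ice cream",
--         "bar", "spread", "granola", "fruit", "kachori", "momo", "dumpling", "nachos",
--         "biscuits", "toast", "sev"
--     ]
-- }
--
-- def assign_meal(food_name):
--     food_name = str(food_name).lower()
--
--     # Step 1: Filter out non-edibles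
--     if any(kw in food_name for kw in non_edible_keywords):
--         return ""  # Null → won’t show in dashboard
--
--     # Step 2: Assign meal type
--     assigned = []
--     for meal, keywords in rules.items():
--         if any(kw in food_name for kw in keywords):
--             assigned.append(meal)
--
--     if not assigned:
--         return "Lunch,Dinner"  # fallback default
--
--     return ",".join(sorted(set(assigned)))
-- ===== SOURCE B (Python) =====
-- non_edible_keywords = [
--     "oil", "butter", "fat", "grease", "lard", "syrup", "vinegar", "sauce",
--     "gravy", "powder", "spice", "seasoning", "salt", "sugar", "extract",
--     "flour", "yeast", "baking", "mix", "starch", "gelatin", "pectin",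
--     "dressing", "essence", "seeds", "kernel", "bran", "meal"
-- ]
--
--
-- keyword_to_meals = {
--     'egg': ('Breakfast',),
--     'omelet': ('Breakfast',),
--     'pancake': ('Breakfast',),
--     'muffin': ('Breakfast',),
--     'toast': ('Breakfast', 'Snacks'),
--     'cereal': ('Breakfast',),
--     'oats': ('Breakfast',),
--     'oatmeal': ('Breakfast',),
--     'porridge': ('Breakfast',),
--     'idli': ('Breakfast',),
--     'dosa': ('Breakfast',),
--     'upma': ('Breakfast',),
--     'poha': ('Breakfast',),
--     'paratha': ('Breakfast', 'Lunch'),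
--     'bagel': ('Breakfast',),
--     'croissant': ('Breakfast',),
--     'yogurt': ('Breakfast',),
--     'lassi': ('Breakfast',),
--     'waffle': ('Breakfast',),
--     'donut': ('Breakfast',),
--     'jam': ('Breakfast',),
--     'honey': ('Breakfast',),
--     'tea': ('Breakfast',),
--     'coffee': ('Breakfast',),
--     'milk': ('Breakfast',),
--     'smoothie': ('Breakfast',),
--     'rice': ('Lunch',),
--     'biryani': ('Dinner', 'Lunch'),
--     'sandwich': ('Lunch',),
--     'burger': ('Lunch',),
--     'wrap': ('Lunch',),
--     'shawarma': ('Lunch',),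
--     'chicken': ('Lunch',),
--     'fish': ('Lunch',),
--     'beef': ('Lunch',),
--     'mutton': ('Lunch',),
--     'pork': ('Lunch',),
--     'dal': ('Dinner', 'Lunch'),
--     'paneer': ('Dinner', 'Lunch'),
--     'sabji': ('Dinner', 'Lunch'),
--     'roti': ('Dinner', 'Lunch'),
--     'chapati': ('Lunch',),
--     'thali': ('Dinner', 'Lunch'),
--     'noodle': ('Lunch',),
--     'pasta': ('Lunch',),
--     'curry': ('Dinner', 'Lunch'),
--     'quesadilla': ('Lunch',),
--     'enchilada': ('Lunch',),
--     'burrito': ('Lunch',),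
--     'taco': ('Lunch',),
--     'fried rice': ('Dinner', 'Lunch'),
--     'kebab': ('Lunch',),
--     'cutlet': ('Dinner', 'Lunch'),
--     'idli sambar': ('Lunch',),
--     'pulao': ('Dinner', 'Lunch'),
--     'pav bhaji': ('Lunch',),
--     'steak': ('Dinner',),
--     'soup': ('Dinner',),
--     'stew': ('Dinner',),
--     'gravy': ('Dinner',),
--     'chowder': ('Dinner',),
--     'chop': ('Dinner',),
--     'roast': ('Dinner',),
--     'lasagna': ('Dinner',),
--     'pizza': ('Dinner',),
--     'spaghetti': ('Dinner',),
--     'fajita': ('Dinner',),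
--     'saute': ('Dinner',),
--     'fillet': ('Dinner',),
--     'meatloaf': ('Dinner',),
--     'naan': ('Dinner',),
--     'korma': ('Dinner',),
--     'chips': ('Snacks',),
--     'fries': ('Snacks',),
--     'pakora': ('Snacks',),
--     'samosa': ('Snacks',),
--     'vada': ('Snacks',),
--     'bhel': ('Snacks',),
--     'chaat': ('Snacks',),
--     'puff': ('Snacks',),
--     'roll': ('Snacks',),
--     'spring roll': ('Snacks',),
--     'nuts': ('Snacks',),
--     'candy': ('Snacks',),
--     'chocolate': ('Snacks',),
--     'cookie': ('Snacks',),
--     'crackers': ('Snacks',),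
--     'pastry': ('Snacks',),
--     'pie': ('Snacks',),
--     'cake': ('Snacks',),
--     'snack': ('Snacks',),
--     'fudge': ('Snacks',),
--     'jelly': ('Snacks',),
--     'pudding': ('Snacks',),
--     'ice cream': ('Snacks',),
--     'bar': ('Snacks',),
--     'spread': ('Snacks',),
--     'granola': ('Snacks',),
--     'fruit': ('Snacks',),
--     'kachori': ('Snacks',),
--     'momo': ('Snacks',),
--     'dumpling': ('Snacks',),
--     'nachos': ('Snacks',),
--     'biscuits': ('Snacks',),
--     'sev': ('Snacks',),
-- }
--
-- def assign_meal(food_name):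
--     food_name = str(food_name).lower()
--     if any(kw in food_name for kw in non_edible_keywords):
--         return ""
--     meals = set()
--     for kw, ms in keyword_to_meals.items():
--         if kw in food_name:
--             meals.update(ms)
--     if not meals:
--         return "Lunch,Dinner"
--     return ",".join(sorted(meals))
-- ===== Notes on version B (the rewrite author's own statement) =====
-- stated objective: alternative
-- what changed: B precomputes a flat inverted keyword-to-meals index and classifies with a single pass that unions each matched keyword's meals into a set, instead of A's per-meal loop that rescans the name against each meal's keyword list.
import Mathlib
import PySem

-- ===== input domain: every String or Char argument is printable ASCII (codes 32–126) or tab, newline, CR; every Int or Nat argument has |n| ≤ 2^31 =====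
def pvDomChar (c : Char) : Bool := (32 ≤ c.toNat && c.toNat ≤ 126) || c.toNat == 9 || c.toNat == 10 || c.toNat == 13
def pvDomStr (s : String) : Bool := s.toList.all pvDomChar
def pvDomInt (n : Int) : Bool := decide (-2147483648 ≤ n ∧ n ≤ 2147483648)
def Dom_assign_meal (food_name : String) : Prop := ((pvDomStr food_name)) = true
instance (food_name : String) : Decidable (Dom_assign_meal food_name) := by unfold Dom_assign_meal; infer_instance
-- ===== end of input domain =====

-- B replaces A's per-meal rescans of the lowered name with one pass over a precomputed
-- inverted keyword→meals index accumulating a set (alternative decomposition, same cost class).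

-- ===== PORT A =====
def pvNonEdible : List String := ["oil", "butter", "fat", "grease", "lard", "syrup", "vinegar", "sauce", "gravy", "powder", "spice", "seasoning", "salt", "sugar", "extract", "flour", "yeast", "baking", "mix", "starch", "gelatin", "pectin", "dressing", "essence", "seeds", "kernel", "bran", "meal"]

def pvRules : List (String × List String) := [
  ("Breakfast", ["egg", "omelet", "pancake", "muffin", "toast", "cereal", "oats", "oatmeal", "porridge", "idli", "dosa", "upma", "poha", "paratha", "bagel", "croissant", "yogurt", "lassi", "waffle", "donut", "jam", "honey", "tea", "coffee", "milk", "smoothie"]),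
  ("Lunch", ["rice", "biryani", "sandwich", "burger", "wrap", "shawarma", "chicken", "fish", "beef", "mutton", "pork", "dal", "paneer", "sabji", "roti", "chapati", "thali", "noodle", "pasta", "curry", "quesadilla", "enchilada", "burrito", "taco", "paratha", "fried rice", "kebab", "cutlet", "idli sambar", "pulao", "pav bhaji"]),
  ("Dinner", ["steak", "soup", "stew", "gravy", "chowder", "chop", "roast", "lasagna", "pizza", "spaghetti", "fajita", "saute", "fillet", "cutlet", "meatloaf", "dal", "sabji", "paneer", "biryani", "thali", "curry", "roti", "naan", "pulao", "fried rice", "korma"]),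
  ("Snacks", ["chips", "fries", "pakora", "samosa", "vada", "bhel", "chaat", "puff", "roll", "spring roll", "nuts", "candy", "chocolate", "cookie", "crackers", "pastry", "pie", "cake", "snack", "fudge", "jelly", "pudding", "ice cream", "bar", "spread", "granola", "fruit", "kachori", "momo", "dumpling", "nachos", "biscuits", "toast", "sev"])]

def pvIndex : List (String × List String) := [
  ("egg", ["Breakfast"]),
  ("omelet", ["Breakfast"]),
  ("pancake", ["Breakfast"]),
  ("muffin", ["Breakfast"]),
  ("toast", ["Breakfast", "Snacks"]),
  ("cereal", ["Breakfast"]),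
  ("oats", ["Breakfast"]),
  ("oatmeal", ["Breakfast"]),
  ("porridge", ["Breakfast"]),
  ("idli", ["Breakfast"]),
  ("dosa", ["Breakfast"]),
  ("upma", ["Breakfast"]),
  ("poha", ["Breakfast"]),
  ("paratha", ["Breakfast", "Lunch"]),
  ("bagel", ["Breakfast"]),
  ("croissant", ["Breakfast"]),
  ("yogurt", ["Breakfast"]),
  ("lassi", ["Breakfast"]),
  ("waffle", ["Breakfast"]),
  ("donut", ["Breakfast"]),
  ("jam", ["Breakfast"]),
  ("honey", ["Breakfast"]),
  ("tea", ["Breakfast"]),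
  ("coffee", ["Breakfast"]),
  ("milk", ["Breakfast"]),
  ("smoothie", ["Breakfast"]),
  ("rice", ["Lunch"]),
  ("biryani", ["Dinner", "Lunch"]),
  ("sandwich", ["Lunch"]),
  ("burger", ["Lunch"]),
  ("wrap", ["Lunch"]),
  ("shawarma", ["Lunch"]),
  ("chicken", ["Lunch"]),
  ("fish", ["Lunch"]),
  ("beef", ["Lunch"]),
  ("mutton", ["Lunch"]),
  ("pork", ["Lunch"]),
  ("dal", ["Dinner", "Lunch"]),
  ("paneer", ["Dinner", "Lunch"]),
  ("sabji", ["Dinner", "Lunch"]),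
  ("roti", ["Dinner", "Lunch"]),
  ("chapati", ["Lunch"]),
  ("thali", ["Dinner", "Lunch"]),
  ("noodle", ["Lunch"]),
  ("pasta", ["Lunch"]),
  ("curry", ["Dinner", "Lunch"]),
  ("quesadilla", ["Lunch"]),
  ("enchilada", ["Lunch"]),
  ("burrito", ["Lunch"]),
  ("taco", ["Lunch"]),
  ("fried rice", ["Dinner", "Lunch"]),
  ("kebab", ["Lunch"]),
  ("cutlet", ["Dinner", "Lunch"]),
  ("idli sambar", ["Lunch"]),
  ("pulao", ["Dinner", "Lunch"]),
  ("pav bhaji", ["Lunch"]),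
  ("steak", ["Dinner"]),
  ("soup", ["Dinner"]),
  ("stew", ["Dinner"]),
  ("gravy", ["Dinner"]),
  ("chowder", ["Dinner"]),
  ("chop", ["Dinner"]),
  ("roast", ["Dinner"]),
  ("lasagna", ["Dinner"]),
  ("pizza", ["Dinner"]),
  ("spaghetti", ["Dinner"]),
  ("fajita", ["Dinner"]),
  ("saute", ["Dinner"]),
  ("fillet", ["Dinner"]),
  ("meatloaf", ["Dinner"]),
  ("naan", ["Dinner"]),
  ("korma", ["Dinner"]),
  ("chips", ["Snacks"]),
  ("fries", ["Snacks"]),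
  ("pakora", ["Snacks"]),
  ("samosa", ["Snacks"]),
  ("vada", ["Snacks"]),
  ("bhel", ["Snacks"]),
  ("chaat", ["Snacks"]),
  ("puff", ["Snacks"]),
  ("roll", ["Snacks"]),
  ("spring roll", ["Snacks"]),
  ("nuts", ["Snacks"]),
  ("candy", ["Snacks"]),
  ("chocolate", ["Snacks"]),
  ("cookie", ["Snacks"]),
  ("crackers", ["Snacks"]),
  ("pastry", ["Snacks"]),
  ("pie", ["Snacks"]),
  ("cake", ["Snacks"]),
  ("snack", ["Snacks"]),
  ("fudge", ["Snacks"]),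
  ("jelly", ["Snacks"]),
  ("pudding", ["Snacks"]),
  ("ice cream", ["Snacks"]),
  ("bar", ["Snacks"]),
  ("spread", ["Snacks"]),
  ("granola", ["Snacks"]),
  ("fruit", ["Snacks"]),
  ("kachori", ["Snacks"]),
  ("momo", ["Snacks"]),
  ("dumpling", ["Snacks"]),
  ("nachos", ["Snacks"]),
  ("biscuits", ["Snacks"]),
  ("sev", ["Snacks"])]

def assign_meal (food_name : String) : String :=
  let fn := PySem.Str.lower food_name
  if pvNonEdible.any (fun kw => PySem.Str.isIn kw fn) then ""
  else
    let assigned := pvRules.foldl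
      (fun acc e => if e.2.any (fun kw => PySem.Str.isIn kw fn) then acc ++ [e.1] else acc)
      ([] : List String)
    if assigned = [] then "Lunch,Dinner"
    else PySem.Str.join "," (PySem.List.sorted (PySem.Set.ofList assigned) (fun x => x) false)

-- ===== PORT B =====
def assign_meal_alt (food_name : String) : String :=
  let fn := PySem.Str.lower food_name
  if pvNonEdible.any (fun kw => PySem.Str.isIn kw fn) then ""
  else
    let meals := pvIndex.foldl
      (fun acc e => if PySem.Str.isIn e.1 fn then PySem.Set.update acc e.2 else acc)
      ([] : PySem.Set String)
    if meals = [] then "Lunch,Dinner"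
    else PySem.Str.join "," (PySem.List.sorted meals (fun x => x) false)

-- ===== PRECONDITION & SPEC =====
def Spec_assign_meal (food_name : String) (out : String) : Prop := out = assign_meal_alt food_name
instance (food_name : String) (out : String) : Decidable (Spec_assign_meal food_name out) := by unfold Spec_assign_meal; infer_instance

-- ===== CLAIM (what is proved, stated in full; the proofs are below) =====
def Claim_equal_assign_meal : Prop := ∀ (food_name : String), Dom_assign_meal food_name → Spec_assign_meal food_name (assign_meal food_name)

-- ===== LEMMAS AND PROOFS =====

-- membership in A's accumulation loop
lemma pv_memA (fn : String) (rs : List (String × List String)) (acc : List String) (m : String) :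
    m ∈ rs.foldl (fun acc e => if e.2.any (fun kw => PySem.Str.isIn kw fn) then acc ++ [e.1] else acc) acc ↔
      m ∈ acc ∨ ∃ e ∈ rs, e.2.any (fun kw => PySem.Str.isIn kw fn) = true ∧ m = e.1 := by
  induction rs generalizing acc with
  | nil => simp
  | cons h t ih =>
    simp only [List.foldl_cons]
    split_ifs with hh
    · rw [ih]
      simp only [List.mem_append, List.mem_singleton, List.exists_mem_cons_iff, hh]
      tauto
    · rw [ih]
      simp only [List.exists_mem_cons_iff]
      tauto

-- membership in B's set-accumulation loop
lemma pv_memB (fn : String) (idx : List (String × List String)) (acc : PySem.Set String) (m : String) :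
    m ∈ idx.foldl (fun acc e => if PySem.Str.isIn e.1 fn then PySem.Set.update acc e.2 else acc) acc ↔
      m ∈ acc ∨ ∃ e ∈ idx, PySem.Str.isIn e.1 fn = true ∧ m ∈ e.2 := by
  induction idx generalizing acc with
  | nil => simp
  | cons h t ih =>
    simp only [List.foldl_cons]
    split_ifs with hh
    · rw [ih]
      simp only [PySem.Set.mem_update, List.exists_mem_cons_iff, hh]
      tauto
    · rw [ih]
      simp only [List.exists_mem_cons_iff]
      tauto

-- B's loop preserves the set invariant (no duplicates)
lemma pv_nodupB (fn : String) (idx : List (String × List String)) (acc : PySem.Set String)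
    (h : acc.Nodup) :
    (idx.foldl (fun acc e => if PySem.Str.isIn e.1 fn then PySem.Set.update acc e.2 else acc) acc).Nodup := by
  induction idx generalizing acc with
  | nil => exact h
  | cons e t ih =>
    simp only [List.foldl_cons]
    split_ifs
    · exact ih _ (PySem.Set.nodup_update _ _ h)
    · exact ih _ h

-- the inverted index is sound w.r.t. the rules table
set_option maxRecDepth 100000 in
lemma pv_idx_sound : ∀ e ∈ pvIndex, ∀ m ∈ e.2, ∃ r ∈ pvRules, r.1 = m ∧ e.1 ∈ r.2 := by decide

-- the inverted index is complete w.r.t. the rules table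
set_option maxRecDepth 100000 in
lemma pv_idx_complete : ∀ r ∈ pvRules, ∀ kw ∈ r.2, ∃ e ∈ pvIndex, e.1 = kw ∧ r.1 ∈ e.2 := by decide

-- for any lowered name, the two loops collect exactly the same meals
lemma pv_key (fn : String) (m : String) :
    (∃ e ∈ pvIndex, PySem.Str.isIn e.1 fn = true ∧ m ∈ e.2) ↔
      (∃ e ∈ pvRules, e.2.any (fun kw => PySem.Str.isIn kw fn) = true ∧ m = e.1) := by
  constructor
  · rintro ⟨e, he, hq, hm⟩
    obtain ⟨r, hr, h1, h2⟩ := pv_idx_sound e he m hm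
    exact ⟨r, hr, List.any_eq_true.mpr ⟨e.1, h2, hq⟩, h1.symm⟩
  · rintro ⟨r, hr, hany, rfl⟩
    obtain ⟨kw, hkw, hq⟩ := List.any_eq_true.mp hany
    obtain ⟨e, he, h1, h2⟩ := pv_idx_complete r hr kw hkw
    exact ⟨e, he, h1 ▸ hq, h2⟩

-- ===== VERDICT (by name: the statement is the Claim_ definition above) =====
theorem assign_meal_spec : Claim_equal_assign_meal := by
  intro food_name _
  unfold Spec_assign_meal assign_meal assign_meal_alt
  generalize PySem.Str.lower food_name = fn
  by_cases hg : pvNonEdible.any (fun kw => PySem.Str.isIn kw fn) = true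
  · rw [if_pos hg, if_pos hg]
  · rw [if_neg hg, if_neg hg]
    have hmem : ∀ m, m ∈ (pvIndex.foldl (fun acc e => if PySem.Str.isIn e.1 fn then PySem.Set.update acc e.2 else acc) ([] : PySem.Set String)) ↔ m ∈ PySem.Set.ofList (pvRules.foldl (fun acc e => if e.2.any (fun kw => PySem.Str.isIn kw fn) then acc ++ [e.1] else acc) ([] : List String)) := by
      intro m
      rw [pv_memB, PySem.Set.mem_ofList, pv_memA]
      simp only [List.not_mem_nil, false_or]
      exact pv_key fn m
    have hperm : List.Perm (pvIndex.foldl (fun acc e => if PySem.Str.isIn e.1 fn then PySem.Set.update acc e.2 else acc) ([] : PySem.Set String)) (PySem.Set.ofList (pvRules.foldl (fun acc e => if e.2.any (fun kw => PySem.Str.isIn kw fn) then acc ++ [e.1] else acc) ([] : List String))) :=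
      (List.perm_ext_iff_of_nodup (pv_nodupB fn pvIndex [] List.nodup_nil)
        (PySem.Set.nodup_ofList _)).mpr hmem
    have hnil : ((pvIndex.foldl (fun acc e => if PySem.Str.isIn e.1 fn then PySem.Set.update acc e.2 else acc) ([] : PySem.Set String)) = ([] : List String)) ↔ ((pvRules.foldl (fun acc e => if e.2.any (fun kw => PySem.Str.isIn kw fn) then acc ++ [e.1] else acc) ([] : List String)) = ([] : List String)) := by
      rw [List.eq_nil_iff_forall_not_mem, List.eq_nil_iff_forall_not_mem]
      constructor
      · intro h m hm
        exact h m ((hmem m).mpr ((PySem.Set.mem_ofList _ _).mpr hm))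
      · intro h m hm
        exact h m ((PySem.Set.mem_ofList _ _).mp ((hmem m).mp hm))
    by_cases hz : (pvRules.foldl (fun acc e => if e.2.any (fun kw => PySem.Str.isIn kw fn) then acc ++ [e.1] else acc) ([] : List String)) = ([] : List String)
    · rw [if_pos hz, if_pos (hnil.mpr hz)]
    · rw [if_neg hz, if_neg (fun h => hz (hnil.mp h))]
      exact (congrArg (PySem.Str.join ",")
        (PySem.List.sorted_eq_sorted_of_perm _ _ _ (fun a b h => h) hperm)).symm
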